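-- pv_equiv track=rewrite | github.com/Edgarelcrack/proyecto-1-ADA2 | EPDLSP-fuerza-bruta.py | asignacion_optima
-- ===== SOURCE A (Python) =====
-- from itertools import product
--
-- def calcular_valor(asignacion, ofertas, B):
--     valor = sum(asignacion[i] * ofertas[i][0] for i in range(len(asignacion)))
--     acciones_sobrantes = A - sum(asignacion)
--     valor += acciones_sobrantes * B
--     return valor
--
-- def asignacion_optima(A, B, ofertas):
--     n = len(ofertas)
--     limites = [oferta[2] for oferta in ofertas]
--     mejores_asignaciones = []
--     mejor_valor = 0
--
--
--     for asignacion in product(*(range(0, Mi + 1) for Mi in limites)):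
--         if sum(asignacion) <= A:
--             valor = calcular_valor(asignacion, ofertas, B)
--             if valor > mejor_valor:
--                 mejor_valor = valor
--                 mejores_asignaciones = [asignacion]
--             elif valor == mejor_valor:
--                 mejores_asignaciones.append(asignacion)
--
--     return mejores_asignaciones, mejor_valor
--
-- A = 1000  # Total de acciones
-- ===== SOURCE B (Python) =====
-- # Branch-and-bound DFS re-implementation. NOTE: like A's helper calcular_valor,
-- # the value uses the module-level constant 1000 (a.py's global A), not the parameter A.
-- TOTAL_ACCIONES = 1000
--
-- def asignacion_optima(A, B, ofertas):
--     limites = [oferta[2] for oferta in ofertas]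
--     precios = [oferta[0] for oferta in ofertas]
--     if A < 0:
--         return [], 0
--     res = []
--     best = 0
--
--     def dfs(i, s, v, prefix):
--         nonlocal res, best
--         if i == len(limites):
--             total = v + (TOTAL_ACCIONES - s) * B
--             if total > best:
--                 best = total
--                 res = [tuple(prefix)]
--             elif total == best:
--                 res.append(tuple(prefix))
--             return
--         for a in range(limites[i] + 1):
--             if s + a > A:
--                 break  # larger a only increases the sum: whole subtree infeasible
--             prefix.append(a)
--             dfs(i + 1, s + a, v + a * precios[i], prefix)
--             prefix.pop()
--
--     dfs(0, 0, 0, [])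
--     return res, best
-- ===== Notes on version B (the rewrite author's own statement) =====
-- stated objective: faster
-- what changed: Replaces the full itertools.product enumeration with a recursive lexicographic DFS that carries the running sum and running value incrementally and prunes a whole subtree as soon as the partial sum exceeds A (counts are nonnegative and each range is increasing, so a break is sound), visiting only feasible prefixes instead of all prod(Mi+1) tuples.
import Mathlib
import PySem

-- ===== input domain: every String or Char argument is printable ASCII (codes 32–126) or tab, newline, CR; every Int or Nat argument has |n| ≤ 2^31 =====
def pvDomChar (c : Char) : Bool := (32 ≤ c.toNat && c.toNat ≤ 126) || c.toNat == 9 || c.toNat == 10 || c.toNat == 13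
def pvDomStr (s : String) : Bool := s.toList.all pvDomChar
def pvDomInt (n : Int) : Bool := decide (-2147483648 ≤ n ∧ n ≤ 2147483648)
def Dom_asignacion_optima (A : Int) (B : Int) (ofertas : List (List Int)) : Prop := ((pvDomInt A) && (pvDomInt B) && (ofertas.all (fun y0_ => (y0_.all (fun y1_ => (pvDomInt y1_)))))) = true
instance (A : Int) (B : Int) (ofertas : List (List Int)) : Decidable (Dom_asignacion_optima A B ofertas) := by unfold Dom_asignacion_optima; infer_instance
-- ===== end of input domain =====

-- B replaces the full cartesian-product scan by a lexicographic DFS with incremental value and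
-- sum-based pruning; like A's helper (which reads the module global A = 1000), the value uses the
-- constant 1000, not the parameter A.

-- ===== PORT A =====
-- itertools.product(*(range(0, Mi+1) for Mi in limites)), lexicographic order
def pyProductRanges : List Int → List (List Int)
  | [] => [[]]
  | M :: rest => (PySem.List.pyRange 0 (M + 1) 1).flatMap
      (fun a => (pyProductRanges rest).map (fun t => a :: t))

-- calcular_valor reads the module-level global A = 1000 (not the parameter of asignacion_optima)
def calcular_valor (asignacion : List Int) (ofertas : List (List Int)) (B : Int) : Int :=
  let valor := (PySem.List.pyRange 0 (asignacion.length : Int) 1).foldl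
    (fun acc i => acc + PySem.List.pyGetD asignacion i 0 * PySem.List.pyGetD (PySem.List.pyGetD ofertas i []) 0 0) 0
  let acciones_sobrantes := 1000 - asignacion.sum
  valor + acciones_sobrantes * B

def asignacion_optima (A : Int) (B : Int) (ofertas : List (List Int)) : List (List Int) × Int :=
  let limites := ofertas.map (fun oferta => PySem.List.pyGetD oferta 2 0)
  (pyProductRanges limites).foldl
    (fun st asignacion =>
      if asignacion.sum ≤ A then
        let valor := calcular_valor asignacion ofertas B
        if st.2 < valor then ([asignacion], valor)
        else if valor = st.2 then (st.1 ++ [asignacion], st.2)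
        else st
      else st)
    ([], 0)

-- ===== PORT B =====
-- the 'for a in range(limites[i]+1)' loop with its break ('body' is the recursive dfs call)
def loopB (A s : Int) (body : Int → List (List Int) × Int → List (List Int) × Int) :
    List (List Int) × Int → List Int → List (List Int) × Int
  | st, [] => st
  | st, a :: rest =>
      if A < s + a then st  -- break: larger a only increases the sum
      else loopB A s body (body a st) rest

-- dfs(i, s, v, pref): limites/precios are the suffixes from index i
def dfsB (A B : Int) : List Int → List Int → Int → Int → List Int →
    List (List Int) × Int → List (List Int) × Int
  | [], _precios, s, v, pref, st =>
      let total := v + (1000 - s) * B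
      if st.2 < total then ([pref], total)
      else if total = st.2 then (st.1 ++ [pref], st.2)
      else st
  | M :: restM, precios, s, v, pref, st =>
      loopB A s
        (fun a st' => dfsB A B restM precios.tail (s + a) (v + a * precios.headD 0) (pref ++ [a]) st')
        st (PySem.List.pyRange 0 (M + 1) 1)

def asignacion_optima_alt (A : Int) (B : Int) (ofertas : List (List Int)) : List (List Int) × Int :=
  let limites := ofertas.map (fun oferta => PySem.List.pyGetD oferta 2 0)
  let precios := ofertas.map (fun oferta => PySem.List.pyGetD oferta 0 0)
  if A < 0 then ([], 0)
  else dfsB A B limites precios 0 0 [] ([], 0)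

-- ===== PRECONDITION & SPEC =====
-- Pre_ excludes only inputs where A raises IndexError: some oferta has fewer than 3 elements.
def Pre_asignacion_optima (A : Int) (B : Int) (ofertas : List (List Int)) : Prop :=
  ∀ o ∈ ofertas, 3 ≤ o.length
instance (A : Int) (B : Int) (ofertas : List (List Int)) : Decidable (Pre_asignacion_optima A B ofertas) := by unfold Pre_asignacion_optima; infer_instance

def pvWitness_asignacion_optima : Int × Int × List (List Int) := (4, 2, [[3, 0, 2], [1, 0, 1]])

def Spec_asignacion_optima (A : Int) (B : Int) (ofertas : List (List Int)) (out : List (List Int) × Int) : Prop := out = asignacion_optima_alt A B ofertas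
instance (A : Int) (B : Int) (ofertas : List (List Int)) (out : List (List Int) × Int) : Decidable (Spec_asignacion_optima A B ofertas out) := by unfold Spec_asignacion_optima; infer_instance

-- ===== CLAIM (what is proved, stated in full; the proofs are below) =====
def Claim_equal_asignacion_optima : Prop := ∀ (A : Int) (B : Int) (ofertas : List (List Int)), Dom_asignacion_optima A B ofertas → Pre_asignacion_optima A B ofertas → Spec_asignacion_optima A B ofertas (asignacion_optima A B ofertas)

-- ===== LEMMAS AND PROOFS =====

-- the leaf update of both programs
def leafStep (total : Int) (asig : List Int) (st : List (List Int) × Int) : List (List Int) × Int :=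
  if st.2 < total then ([asig], total)
  else if total = st.2 then (st.1 ++ [asig], st.2)
  else st

def dotP (p t : List Int) : Int := (List.zipWith (· * ·) p t).sum

-- the fold step used in the common reformulation of both programs
def stepG (B v s : Int) (pref precios : List Int) (st : List (List Int) × Int) (t : List Int) :
    List (List Int) × Int :=
  leafStep (v + dotP precios t + (1000 - (s + t.sum)) * B) (pref ++ t) st

lemma dotP_cons (p : List Int) (a : Int) (t : List Int) :
    dotP p (a :: t) = a * p.headD 0 + dotP p.tail t := by
  cases p with
  | nil => simp [dotP]
  | cons q ps => simp [dotP]; ring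

lemma stepG_cons (Aa B v s : Int) (pref precios : List Int) (st : List (List Int) × Int)
    (a : Int) (t : List Int) :
    stepG B v s pref precios st (a :: t)
      = stepG B (v + a * precios.headD 0) (s + a) (pref ++ [a]) precios.tail st t := by
  unfold stepG
  rw [dotP_cons, List.append_cons]
  congr 1
  · simp only [List.sum_cons]; ring

lemma sum_nonneg_of_mem_pyProduct : ∀ (L : List Int) (t : List Int),
    t ∈ pyProductRanges L → 0 ≤ t.sum := by
  intro L
  induction L with
  | nil => intro t ht; simp [pyProductRanges] at ht; simp [ht]
  | cons M rest ih =>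
      intro t ht
      simp only [pyProductRanges, List.mem_flatMap, List.mem_map] at ht
      obtain ⟨a, ha, t', ht', rfl⟩ := ht
      have h0 : 0 ≤ a := (PySem.List.mem_pyRange_one.mp ha).1
      have := ih t' ht'
      simp; omega

lemma length_of_mem_pyProduct : ∀ (L : List Int) (t : List Int),
    t ∈ pyProductRanges L → t.length = L.length := by
  intro L
  induction L with
  | nil => intro t ht; simp [pyProductRanges] at ht; simp [ht]
  | cons M rest ih =>
      intro t ht
      simp only [pyProductRanges, List.mem_flatMap, List.mem_map] at ht
      obtain ⟨a, _, t', ht', rfl⟩ := ht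
      simp [ih t' ht']

-- the DFS computes the fold of stepG over the feasible tuples of the product, in order
lemma dfs_eq (Aa B : Int) : ∀ (limites precios : List Int) (s v : Int) (pref : List Int)
    (st : List (List Int) × Int), s ≤ Aa →
    dfsB Aa B limites precios s v pref st
      = ((pyProductRanges limites).filter (fun t => decide (s + t.sum ≤ Aa))).foldl
          (stepG B v s pref precios) st := by
  intro limites
  induction limites with
  | nil =>
      intro precios s v pref st hs
      rw [show pyProductRanges [] = [[]] from rfl,
        List.filter_cons_of_pos (by simp; omega), List.filter_nil]
      simp [dfsB, stepG, leafStep, dotP]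
  | cons M restM ih =>
      intro precios s v pref st hs
      have loop_eq : ∀ (as : List Int), (∀ x ∈ as, 0 ≤ x) → as.Pairwise (· ≤ ·) →
          ∀ st, loopB Aa s
              (fun a st' => dfsB Aa B restM precios.tail (s + a) (v + a * precios.headD 0)
                (pref ++ [a]) st') st as
            = ((as.flatMap (fun a => (pyProductRanges restM).map (fun t => a :: t))).filter
                (fun t => decide (s + t.sum ≤ Aa))).foldl (stepG B v s pref precios) st := by
        intro as
        induction as with
        | nil => intro _ _ st; simp [loopB]
        | cons a rest ihl =>
            intro hnn hpw st
            by_cases hbr : Aa < s + a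
            · -- break: every remaining tuple is infeasible, the filter is empty
              have hempty : ((a :: rest).flatMap
                  (fun a => (pyProductRanges restM).map (fun t => a :: t))).filter
                    (fun t => decide (s + t.sum ≤ Aa)) = [] := by
                rw [List.filter_eq_nil_iff]
                intro t ht
                simp only [List.mem_flatMap, List.mem_map] at ht
                obtain ⟨a', ha', t', ht', rfl⟩ := ht
                have hsum := sum_nonneg_of_mem_pyProduct restM t' ht'
                have haa' : a ≤ a' := by
                  rcases List.mem_cons.mp ha' with h | h
                  · omega
                  · exact (List.pairwise_cons.mp hpw).1 a' h
                simp only [List.sum_cons, decide_eq_true_eq]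
                omega
              rw [loopB, if_pos hbr, hempty]
              simp
            · -- take a, recurse
              push_neg at hbr
              rw [loopB, if_neg (by omega)]
              rw [ihl (fun x hx => hnn x (List.mem_cons_of_mem _ hx)) (List.Pairwise.of_cons hpw)]
              rw [ih precios.tail (s + a) (v + a * precios.headD 0) (pref ++ [a]) st hbr]
              rw [List.flatMap_cons, List.filter_append, List.foldl_append]
              congr 1
              rw [List.filter_map, List.foldl_map]
              rw [show (List.filter ((fun t => decide (s + t.sum ≤ Aa)) ∘ fun t => a :: t)
                    (pyProductRanges restM))
                  = List.filter (fun t => decide (s + a + t.sum ≤ Aa)) (pyProductRanges restM) from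
                List.filter_congr (fun t _ => by
                  simp only [Function.comp_apply, List.sum_cons, decide_eq_decide]; omega)]
              apply PySem.List.foldl_congr_mem
              intro acc t' _
              exact (stepG_cons Aa B v s pref precios acc a t').symm
      have hp : (PySem.List.pyRange 0 (M + 1) 1).Pairwise (fun x1 x2 => x1 ≤ x2) :=
        List.Pairwise.imp (fun h => le_of_lt h) (PySem.List.pairwise_lt_pyRange_one 0 (M + 1))
      rw [dfsB, loop_eq _ (fun x hx => (PySem.List.mem_pyRange_one.mp hx).1) hp st]
      rfl

-- the indexed sum in calcular_valor is the dot product with the price column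
lemma sumIdx_eq : ∀ (t : List Int) (os : List (List Int)), t.length = os.length →
    ((List.range t.length).map
        (fun i => t.getD i 0 * (os.getD i []).getD 0 0)).sum
      = dotP (os.map (fun o => PySem.List.pyGetD o 0 0)) t := by
  intro t
  induction t with
  | nil => intro os _; simp [dotP]
  | cons a t' ih =>
      intro os hlen
      cases os with
      | nil => simp at hlen
      | cons o os' =>
          rw [List.length_cons, List.range_succ_eq_map, List.map_cons, List.map_map, List.sum_cons]
          have : ((List.range t'.length).map
              ((fun i => (a :: t').getD i 0 * ((o :: os').getD i []).getD 0 0) ∘ Nat.succ)).sum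
              = ((List.range t'.length).map
                  (fun i => t'.getD i 0 * (os'.getD i []).getD 0 0)).sum := by
            apply congrArg
            apply List.map_congr_left
            intro i _
            simp [Function.comp]
          rw [this, ih os' (by simpa using hlen)]
          simp [dotP, PySem.List.pyGetD_zero, mul_comm]

lemma calc_eq (B : Int) (t : List Int) (os : List (List Int)) (hlen : t.length = os.length) :
    calcular_valor t os B
      = dotP (os.map (fun o => PySem.List.pyGetD o 0 0)) t + (1000 - t.sum) * B := by
  unfold calcular_valor
  have h1 : (PySem.List.pyRange 0 (t.length : Int) 1).foldl
      (fun acc i => acc + PySem.List.pyGetD t i 0 * PySem.List.pyGetD (PySem.List.pyGetD os i []) 0 0) 0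
      = ((List.range t.length).map (fun i => t.getD i 0 * (os.getD i []).getD 0 0)).sum := by
    rw [PySem.List.pyRange_zero_nat]
    rw [List.foldl_map]
    induction t.length with
    | zero => simp
    | succ n ihn =>
        rw [List.range_succ, List.foldl_append, List.map_append, List.sum_append, ihn]
        simp [PySem.List.pyGetD_natCast, PySem.List.pyGetD_zero]
  rw [h1, sumIdx_eq t os hlen]

-- ===== VERDICT (by name: the statement is the Claim_ definition above) =====
theorem asignacion_optima_spec : Claim_equal_asignacion_optima := by
  intro A B ofertas _ _
  unfold Spec_asignacion_optima asignacion_optima asignacion_optima_alt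
  set limites := ofertas.map (fun oferta => PySem.List.pyGetD oferta 2 0) with hlim
  set precios := ofertas.map (fun oferta => PySem.List.pyGetD oferta 0 0) with hpre
  have hA : (pyProductRanges limites).foldl
      (fun st asignacion =>
        if asignacion.sum ≤ A then
          let valor := calcular_valor asignacion ofertas B
          if st.2 < valor then ([asignacion], valor)
          else if valor = st.2 then (st.1 ++ [asignacion], st.2)
          else st
        else st) ([], 0)
      = ((pyProductRanges limites).filter (fun t => decide (0 + t.sum ≤ A))).foldl
          (stepG B 0 0 [] precios) ([], 0) := by
    rw [List.foldl_filter]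
    apply PySem.List.foldl_congr_mem
    intro st t ht
    have hlen : t.length = ofertas.length := by
      have := length_of_mem_pyProduct limites t ht
      simpa [hlim] using this
    have hc := calc_eq B t ofertas (by simpa using hlen)
    by_cases h : t.sum ≤ A
    · rw [if_pos h, if_pos (show decide (0 + t.sum ≤ A) = true by simp; omega)]
      show leafStep (calcular_valor t ofertas B) t st = stepG B 0 0 [] precios st t
      unfold stepG
      rw [hc, ← hpre]
      congr 1
      ring
    · rw [if_neg h, if_neg (show ¬ (decide (0 + t.sum ≤ A) = true) by simp; omega)]
  by_cases h0 : A < 0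
  · rw [if_pos h0, hA]
    have : (pyProductRanges limites).filter (fun t => decide (0 + t.sum ≤ A)) = [] := by
      rw [List.filter_eq_nil_iff]
      intro t ht
      have := sum_nonneg_of_mem_pyProduct limites t ht
      simp; omega
    rw [this]; rfl
  · rw [if_neg h0, hA, dfs_eq A B limites precios 0 0 [] ([], 0) (by omega)]
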